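-- pv_equiv track=rewrite | github.com/LucaMica02/AlgorithmsCourseSapienza | Dynamic_Programming/Dynamic_Programming_Exercises.py | quaternaryStrings1
-- ===== SOURCE A (Python) =====
-- def quaternaryStrings1(n):
--     #case base is the empty string
--     if n == 0:
--         return 1
--     T = [ [0,0,0,0] for _ in range(n + 1) ]
--     T[0], T[1] = [0,0,0,0], [1,1,1,1]
--     #IDEA -> a string can termine with:
--     # - even number (0 or 2) and I can append 0 or 1 or 2 or 3
--     # - odd number (1 or 3) and I can append 0 or 2
--     for i in range(2, n + 1):
--         even = sum(T[i - 1])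
--         odd = T[i - 1][0] + T[i - 1][2]
--         T[i][0] = T[i][2] = even
--         T[i][1] = T[i][3] = odd
--     return sum(T[n])
-- ===== SOURCE B (Python) =====
-- def quaternaryStrings1(n):
--     # Matrix exponentiation of the 2x2 linear recurrence (even/odd-ending counts).
--     if n < 0:
--         raise ValueError("n must be non-negative")
--     if n == 0:
--         return 1
--     def mul(x, y):
--         return (x[0]*y[0] + x[1]*y[2], x[0]*y[1] + x[1]*y[3],
--                 x[2]*y[0] + x[3]*y[2], x[2]*y[1] + x[3]*y[3])
--     m = (2, 2, 2, 0)
--     r = (1, 0, 0, 1)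
--     k = n - 1
--     while k > 0:
--         if k & 1:
--             r = mul(r, m)
--         m = mul(m, m)
--         k >>= 1
--     return (2*r[0] + 2*r[1]) + (2*r[2] + 2*r[3])
-- ===== Notes on version B (the rewrite author's own statement) =====
-- stated objective: faster
-- what changed: Replaces the O(n) row-by-row DP table with O(log n) square-and-multiply exponentiation of the constant 2x2 transition matrix of the same recurrence.
import Mathlib
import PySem

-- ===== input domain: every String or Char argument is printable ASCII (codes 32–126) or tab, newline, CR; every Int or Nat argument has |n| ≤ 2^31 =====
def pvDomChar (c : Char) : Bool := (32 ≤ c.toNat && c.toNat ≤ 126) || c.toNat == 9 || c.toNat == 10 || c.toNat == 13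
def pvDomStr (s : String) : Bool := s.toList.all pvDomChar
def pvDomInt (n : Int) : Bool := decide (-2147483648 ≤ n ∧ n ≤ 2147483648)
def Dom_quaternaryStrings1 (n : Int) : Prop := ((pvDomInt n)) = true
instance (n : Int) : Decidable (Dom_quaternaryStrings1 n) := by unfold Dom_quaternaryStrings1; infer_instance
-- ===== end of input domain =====

-- B replaces A's O(n) table-filling DP by O(log n) binary exponentiation of the constant
-- 2x2 transition matrix of the same recurrence (objective: faster, asymptotic).

-- ===== PORT A =====
-- literal transliteration of A's table DP; pyGetD defaults can only be hit outside Pre_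
def qsStep (T : List (List Int)) (i : Int) : List (List Int) :=
  let even := (PySem.List.pyGetD T (i - 1) []).sum
  let odd := PySem.List.pyGetD (PySem.List.pyGetD T (i - 1) []) 0 0 +
             PySem.List.pyGetD (PySem.List.pyGetD T (i - 1) []) 2 0
  -- T[i][0] = T[i][2] = even
  let T := PySem.List.pySetD T i (PySem.List.pySetD (PySem.List.pyGetD T i []) 0 even)
  let T := PySem.List.pySetD T i (PySem.List.pySetD (PySem.List.pyGetD T i []) 2 even)
  -- T[i][1] = T[i][3] = odd
  let T := PySem.List.pySetD T i (PySem.List.pySetD (PySem.List.pyGetD T i []) 1 odd)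
  let T := PySem.List.pySetD T i (PySem.List.pySetD (PySem.List.pyGetD T i []) 3 odd)
  T

def quaternaryStrings1 (n : Int) : Int :=
  if n == 0 then 1
  else
    let T : List (List Int) := (PySem.List.pyRange 0 (n + 1) 1).map (fun _ => [0, 0, 0, 0])
    let T := PySem.List.pySetD T 0 [0, 0, 0, 0]
    let T := PySem.List.pySetD T 1 [1, 1, 1, 1]
    let T := (PySem.List.pyRange 2 (n + 1) 1).foldl qsStep T
    (PySem.List.pyGetD T n []).sum

-- ===== PORT B =====
-- a 2x2 integer matrix, as Source B's 4-tuple (a b / c d)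
structure QM where
  a : Int
  b : Int
  c : Int
  d : Int
deriving DecidableEq, Repr

def qMul (x y : QM) : QM :=
  ⟨x.a * y.a + x.b * y.c, x.a * y.b + x.b * y.d,
   x.c * y.a + x.d * y.c, x.c * y.b + x.d * y.d⟩

-- Source B's while-loop (square-and-multiply), k & 1 = k % 2, k >>= 1 = k / 2 for k > 0
def qPow (m : QM) (k : Nat) (r : QM) : QM :=
  if k = 0 then r
  else qPow (qMul m m) (k / 2) (if k % 2 = 1 then qMul r m else r)
termination_by k
decreasing_by exact Nat.div_lt_self (Nat.pos_of_ne_zero (by assumption)) (by omega)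

def quaternaryStrings1_alt (n : Int) : Int :=
  if n < 0 then 0  -- Source B raises ValueError here; outside Pre_, nothing is claimed
  else if n == 0 then 1
  else
    let r := qPow ⟨2, 2, 2, 0⟩ (n - 1).toNat ⟨1, 0, 0, 1⟩
    (2 * r.a + 2 * r.b) + (2 * r.c + 2 * r.d)

-- ===== PRECONDITION & SPEC =====
-- Pre_ excludes n < 0, where A's tuple assignment T[0], T[1] = … raises IndexError
-- (the table is empty); B raises ValueError there.
def Pre_quaternaryStrings1 (n : Int) : Prop := 0 ≤ n
instance (n : Int) : Decidable (Pre_quaternaryStrings1 n) := by unfold Pre_quaternaryStrings1; infer_instance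
def pvWitness_quaternaryStrings1 : Int := 5

def Spec_quaternaryStrings1 (n : Int) (out : Int) : Prop := out = quaternaryStrings1_alt n
instance (n : Int) (out : Int) : Decidable (Spec_quaternaryStrings1 n out) := by unfold Spec_quaternaryStrings1; infer_instance

-- ===== CLAIM (what is proved, stated in full; the proofs are below) =====
def Claim_equal_quaternaryStrings1 : Prop := ∀ (n : Int), Dom_quaternaryStrings1 n → Pre_quaternaryStrings1 n → Spec_quaternaryStrings1 n (quaternaryStrings1 n)

-- ===== LEMMAS AND PROOFS =====

-- the shared recurrence: counts (ending-even, ending-odd) for length k+1, each halved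
def fEO : Nat → Int × Int
  | 0 => (1, 1)
  | k + 1 => (2 * (fEO k).1 + 2 * (fEO k).2, 2 * (fEO k).1)

-- ---- B side ----
def qI : QM := ⟨1, 0, 0, 1⟩
def qM : QM := ⟨2, 2, 2, 0⟩

def qNPow (m : QM) : Nat → QM
  | 0 => qI
  | k + 1 => qMul m (qNPow m k)

theorem qMul_assoc (x y z : QM) : qMul (qMul x y) z = qMul x (qMul y z) := by
  simp only [qMul, QM.mk.injEq]
  refine ⟨by ring, by ring, by ring, by ring⟩

theorem qMul_I_left (x : QM) : qMul qI x = x := by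
  cases x; simp [qMul, qI]

theorem qMul_I_right (x : QM) : qMul x qI = x := by
  cases x; simp [qMul, qI]

theorem qNPow_add (m : QM) (a b : Nat) :
    qNPow m (a + b) = qMul (qNPow m a) (qNPow m b) := by
  induction a with
  | zero => simp [qNPow, qMul_I_left]
  | succ a ih =>
    have : a + 1 + b = (a + b) + 1 := by omega
    rw [this, qNPow, qNPow, ih, ← qMul_assoc]

theorem qNPow_sq (m : QM) (j : Nat) : qNPow (qMul m m) j = qNPow m (2 * j) := by
  induction j with
  | zero => rfl
  | succ j ih =>
    have : 2 * (j + 1) = (2 * j) + 1 + 1 := by omega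
    rw [qNPow, ih, this, qNPow, qNPow, qMul_assoc]

theorem qPow_eq (k : Nat) : ∀ (m r : QM), qPow m k r = qMul r (qNPow m k) := by
  induction k using Nat.strong_induction_on with
  | _ k ih =>
    intro m r
    rw [qPow]
    by_cases hk : k = 0
    · simp [hk, qNPow, qMul_I_right]
    · simp only [hk, ite_false]
      rw [ih (k / 2) (Nat.div_lt_self (Nat.pos_of_ne_zero hk) (by omega))]
      rw [qNPow_sq]
      have hsplit : k = k % 2 + 2 * (k / 2) := by omega
      by_cases h2 : k % 2 = 1
      · simp only [h2, if_pos]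
        conv_rhs => rw [hsplit, h2, qNPow_add]
        rw [← qMul_assoc]
        congr 1
        simp [qNPow, qMul_I_right]
      · have h0 : k % 2 = 0 := by omega
        simp only [h2, ite_false]
        conv_rhs => rw [hsplit, h0]
        simp

theorem qNPow_sum (k : Nat) :
    (qNPow qM k).a + (qNPow qM k).b = (fEO k).1 ∧
    (qNPow qM k).c + (qNPow qM k).d = (fEO k).2 := by
  induction k with
  | zero => simp [qNPow, qI, fEO]
  | succ k ih =>
    obtain ⟨h1, h2⟩ := ih
    simp only [qM] at h1 h2
    constructor <;>
    · simp only [qNPow, qMul, qM, fEO]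
      omega

theorem alt_eq (n : Int) (hn : 1 ≤ n) :
    quaternaryStrings1_alt n = 2 * (fEO (n - 1).toNat).1 + 2 * (fEO (n - 1).toNat).2 := by
  have hneg : ¬ n < 0 := by omega
  have hne : ¬ (n == 0) = true := by simp; omega
  simp only [quaternaryStrings1_alt, hneg, hne, if_false, Bool.false_eq_true]
  rw [show (⟨2, 2, 2, 0⟩ : QM) = qM from rfl, show (⟨1, 0, 0, 1⟩ : QM) = qI from rfl]
  rw [qPow_eq, qMul_I_left]
  obtain ⟨h1, h2⟩ := qNPow_sum (n - 1).toNat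
  show 2 * (qNPow qM (n - 1).toNat).a + 2 * (qNPow qM (n - 1).toNat).b +
      (2 * (qNPow qM (n - 1).toNat).c + 2 * (qNPow qM (n - 1).toNat).d) = _
  omega

-- ---- A side ----
def rowF (k : Nat) : List Int := [(fEO k).1, (fEO k).2, (fEO k).1, (fEO k).2]

def tableOf (m N : Nat) : List (List Int) :=
  [0, 0, 0, 0] :: (List.range N).map (fun j => if j ≤ m then rowF j else [0, 0, 0, 0])

theorem length_tableOf (m N : Nat) : (tableOf m N).length = N + 1 := by
  simp [tableOf]

theorem tableOf_get_succ (m N j : Nat) (h : j < N) :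
    (tableOf m N)[j + 1]'(by simp [length_tableOf]; omega) =
      if j ≤ m then rowF j else [0, 0, 0, 0] := by
  simp [tableOf]

theorem tableOf_set (m N : Nat) (_h : m + 2 ≤ N) :
    (tableOf m N).set (m + 2) (rowF (m + 1)) = tableOf (m + 1) N := by
  apply List.ext_getElem
  · simp [length_tableOf]
  · intro i hi hi'
    rw [List.getElem_set]
    rcases i with _ | j
    · simp [tableOf]
    · have hj : j < N := by simp [length_tableOf] at hi'; omega
      rw [tableOf_get_succ m N j hj, tableOf_get_succ (m + 1) N j hj]
      by_cases he : m + 2 = j + 1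
      · have : j = m + 1 := by omega
        simp [he, this]
      · have : (j ≤ m) = (j ≤ m + 1) := by
          apply propext; constructor <;> intro <;> omega
        simp [he, this]

theorem qsStep_table (m N : Nat) (h : m + 2 ≤ N) :
    qsStep (tableOf m N) ((2 : Int) + (m : Int)) = tableOf (m + 1) N := by
  have hlen : (tableOf m N).length = N + 1 := length_tableOf m N
  have hprev : PySem.List.pyGetD (tableOf m N) ((2 : Int) + (m : Int) - 1) ([] : List Int) = rowF m := by
    have h1 : (2 : Int) + (m : Int) - 1 = ((m + 1 : Nat) : Int) := by push_cast; ring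
    rw [h1, PySem.List.pyGetD_natCast]
    rw [List.getD_eq_getElem _ _ (by omega)]
    rw [tableOf_get_succ m N m (by omega)]
    simp
  have hcur : PySem.List.pyGetD (tableOf m N) ((2 : Int) + (m : Int)) ([] : List Int) = [0, 0, 0, 0] := by
    have h1 : (2 : Int) + (m : Int) = ((m + 2 : Nat) : Int) := by push_cast; ring
    rw [h1, PySem.List.pyGetD_natCast]
    rw [List.getD_eq_getElem _ _ (by omega)]
    rw [tableOf_get_succ m N (m + 1) (by omega)]
    simp
  unfold qsStep
  simp only [hprev]
  have hset : ∀ (v : List Int), PySem.List.pySetD (tableOf m N) ((2 : Int) + (m : Int)) v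
      = (tableOf m N).set (m + 2) v := by
    intro v
    have h1 : (2 : Int) + (m : Int) = ((m + 2 : Nat) : Int) := by push_cast; ring
    rw [h1, PySem.List.pySetD_natCast]
  -- evaluate the four chained element assignments on the current row
  have even_eq : (rowF m).sum = 2 * (fEO m).1 + 2 * (fEO m).2 := by
    simp [rowF]; ring
  have odd_eq : PySem.List.pyGetD (rowF m) 0 0 + PySem.List.pyGetD (rowF m) 2 0 = 2 * (fEO m).1 := by
    simp [rowF, PySem.List.pyGetD]; ring
  simp only [hset, hcur]
  -- after the first set, reads of T[i] see the freshly set row; sets at equal index collapse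
  have hget_set : ∀ (v : List Int), PySem.List.pyGetD ((tableOf m N).set (m + 2) v)
      ((2 : Int) + (m : Int)) ([] : List Int) = v := by
    intro v
    have h1 : (2 : Int) + (m : Int) = ((m + 2 : Nat) : Int) := by push_cast; ring
    rw [h1, PySem.List.pyGetD_natCast]
    rw [List.getD_eq_getElem _ _ (by simp [hlen]; omega)]
    rw [List.getElem_set_self (by simp [hlen]; omega)]
  have hset2 : ∀ (v w : List Int), PySem.List.pySetD ((tableOf m N).set (m + 2) v)
      ((2 : Int) + (m : Int)) w = (tableOf m N).set (m + 2) w := by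
    intro v w
    have h1 : (2 : Int) + (m : Int) = ((m + 2 : Nat) : Int) := by push_cast; ring
    rw [h1, PySem.List.pySetD_natCast, List.set_set]
  simp only [hget_set, hset2]
  have hrow : ∀ a b : Int, PySem.List.pySetD (PySem.List.pySetD (PySem.List.pySetD
      (PySem.List.pySetD ([0, 0, 0, 0] : List Int) 0 a) 2 a) 1 b) 3 b = [a, b, a, b] :=
    fun a b => rfl
  rw [hrow, even_eq, odd_eq]
  rw [show [2 * (fEO m).1 + 2 * (fEO m).2, 2 * (fEO m).1,
        2 * (fEO m).1 + 2 * (fEO m).2, 2 * (fEO m).1] = rowF (m + 1) from by simp [rowF, fEO]]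
  exact tableOf_set m N h

theorem loop_table (N : Nat) (hN : 1 ≤ N) : ∀ (m : Nat), m ≤ N - 1 →
    (PySem.List.pyRange 2 (2 + (m : Int)) 1).foldl qsStep (tableOf 0 N) = tableOf m N := by
  intro m
  induction m with
  | zero => intro _; rw [PySem.List.pyRange_one_eq_nil (by omega)]; rfl
  | succ m ih =>
    intro hm
    have h1 : (2 : Int) + ((m + 1 : Nat) : Int) = (2 + (m : Int)) + 1 := by push_cast; ring
    rw [h1, PySem.List.pyRange_one_succ_right (by omega), List.foldl_append]
    rw [ih (by omega)]
    simpa using qsStep_table m N (by omega)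

theorem a_eq (n : Int) (hn : 1 ≤ n) :
    quaternaryStrings1 n = 2 * (fEO (n - 1).toNat).1 + 2 * (fEO (n - 1).toNat).2 := by
  obtain ⟨N, hNn⟩ : ∃ N : Nat, n = (N : Int) := ⟨n.toNat, by omega⟩
  have hN : 1 ≤ N := by omega
  subst hNn
  have hne : ¬ ((N : Int) == 0) = true := by simp; omega
  simp only [quaternaryStrings1, hne, if_false, Bool.false_eq_true]
  -- the initial table is tableOf 0 N
  have hinit : PySem.List.pySetD (PySem.List.pySetD
      ((PySem.List.pyRange 0 ((N : Int) + 1) 1).map (fun _ => ([0, 0, 0, 0] : List Int)))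
      0 [0, 0, 0, 0]) 1 [1, 1, 1, 1] = tableOf 0 N := by
    have hrep : (PySem.List.pyRange 0 ((N : Int) + 1) 1).map (fun _ => ([0, 0, 0, 0] : List Int))
        = List.replicate (N + 1) [0, 0, 0, 0] := by
      have hlen : (((N : Int) + 1) - 0).toNat = N + 1 := by omega
      rw [List.map_const', PySem.List.length_pyRange_one, hlen]
    rw [hrep]
    obtain ⟨K, hK⟩ : ∃ K, N = K + 1 := ⟨N - 1, by omega⟩
    subst hK
    have e1 : List.replicate (K + 1 + 1) ([0, 0, 0, 0] : List Int)
        = [0, 0, 0, 0] :: [0, 0, 0, 0] :: List.replicate K [0, 0, 0, 0] := by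
      simp [List.replicate_succ]
    rw [e1]
    have e2 : PySem.List.pySetD (PySem.List.pySetD
        (([0, 0, 0, 0] : List Int) :: [0, 0, 0, 0] :: List.replicate K [0, 0, 0, 0])
        0 [0, 0, 0, 0]) 1 [1, 1, 1, 1]
        = [0, 0, 0, 0] :: [1, 1, 1, 1] :: List.replicate K [0, 0, 0, 0] := by
      simp [PySem.List.pySetD_of_nonneg]
    rw [e2]
    unfold tableOf
    rw [List.range_succ_eq_map, List.map_cons, List.map_map]
    have e3 : List.map ((fun j => if j ≤ 0 then rowF j else ([0, 0, 0, 0] : List Int)) ∘ Nat.succ)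
        (List.range K) = List.replicate K [0, 0, 0, 0] := by
      rw [show ((fun j => if j ≤ 0 then rowF j else ([0, 0, 0, 0] : List Int)) ∘ Nat.succ)
          = fun _ => ([0, 0, 0, 0] : List Int) from funext fun j => by simp]
      simp
    rw [e3]
    rfl
  rw [hinit]
  have hloop := loop_table N hN (N - 1) (le_refl _)
  have hrange : (2 : Int) + ((N - 1 : Nat) : Int) = (N : Int) + 1 - 1 + 1 - 1 + 1 := by push_cast [hN]; ring
  rw [show ((N : Int) + 1) = 2 + ((N - 1 : Nat) : Int) from by push_cast [hN]; ring]
  rw [hloop]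
  -- final read: T[N] = rowF (N - 1)
  have hfin : PySem.List.pyGetD (tableOf (N - 1) N) (N : Int) ([] : List Int) = rowF (N - 1) := by
    rw [PySem.List.pyGetD_natCast]
    rw [List.getD_eq_getElem _ _ (by rw [length_tableOf]; omega)]
    have hts := tableOf_get_succ (N - 1) N (N - 1) (by omega)
    simp only [show N - 1 + 1 = N from by omega, le_refl, if_true] at hts
    exact hts
  rw [hfin]
  have : (((N : Int) - 1).toNat) = N - 1 := by omega
  rw [this]
  simp [rowF]; ring

-- ===== VERDICT =====
theorem quaternaryStrings1_spec : Claim_equal_quaternaryStrings1 := by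
  intro n _ hpre
  unfold Spec_quaternaryStrings1
  by_cases h0 : n = 0
  · subst h0; rfl
  · have h1 : 1 ≤ n := by unfold Pre_quaternaryStrings1 at hpre; omega
    rw [a_eq n h1, alt_eq n h1]
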